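-- pv_equiv track=rewrite | github.com/melloddy/MELLODDY-TUNER | melloddy_tuner/scripts/aggregate_values.py | most_common_qualifier
-- ===== SOURCE A (Python) =====
-- def most_common_qualifier(qualifiers: list) -> str:
--     """Determines the most common qualifier, in case of a tie including '=' returns '='
--     Input:
--         qualifiers - list of qualifiers, accepted values '<', '>' and '='
--     Output:
--         str: the most common qualifier. In case of a tie prefers '='. If a tie is between '<' and '>' - returns None
--     """
--     counts = []
--     for qual in ["<", ">", "="]:
--         counts.append((qual, qualifiers.count(qual)))
--     counts.sort(key=lambda tup: tup[1], reverse=True)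
--     if counts[0][1] > counts[1][1]:
--         return counts[0][0]
--     elif counts[0][0] == "=" or counts[1][0] == "=" or counts[2][1] == counts[0][1]:
--         return "="
--     else:
--         return None
-- ===== SOURCE B (Python) =====
-- def most_common_qualifier(qualifiers: list) -> str:
--     """Most common qualifier among '<', '>', '='; tie including '=' -> '=',
--     pure '<'/'>' tie -> None. Single pass keeping two signed pairwise
--     differences (no counts, no max, no sort): lg = #'<'-#'>', le = #'<'-#'='.
--     '=' attains the maximum iff le <= 0 and le <= lg; otherwise the sign of
--     lg decides between '<', '>' and a pure '<'/'>' tie."""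
--     lg = 0
--     le = 0
--     for q in qualifiers:
--         if q == "<":
--             lg += 1
--             le += 1
--         elif q == ">":
--             lg -= 1
--         elif q == "=":
--             le -= 1
--     if le <= 0 and le <= lg:
--         return "="
--     if lg > 0:
--         return "<"
--     if lg < 0:
--         return ">"
--     return None
-- ===== Notes on version B (the rewrite author's own statement) =====
-- stated objective: alternative
-- what changed: B makes a single explicit pass maintaining only two signed pairwise differences (#'<'-#'>' and #'<'-#'='), never computing the three counts, a max or a sorted list, and decides by sign tests: '=' attains the maximum iff le<=0 and le<=lg, else the sign of lg picks '<', '>' or the None tie; A counts each symbol with three .count passes, sorts a pair list descending and reads positions.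
import Mathlib
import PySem

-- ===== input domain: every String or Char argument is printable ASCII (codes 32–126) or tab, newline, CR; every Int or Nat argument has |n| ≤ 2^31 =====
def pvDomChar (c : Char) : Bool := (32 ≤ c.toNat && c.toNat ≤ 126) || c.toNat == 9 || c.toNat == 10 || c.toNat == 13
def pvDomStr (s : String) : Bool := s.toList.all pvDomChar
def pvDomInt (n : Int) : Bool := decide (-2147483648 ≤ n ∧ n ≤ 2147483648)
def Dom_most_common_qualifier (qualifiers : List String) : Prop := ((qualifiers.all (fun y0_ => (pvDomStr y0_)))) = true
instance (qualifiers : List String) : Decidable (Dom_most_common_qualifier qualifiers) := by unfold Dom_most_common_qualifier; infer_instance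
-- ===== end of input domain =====

-- B replaces A's count/sort/index scheme by a single pass over two signed pairwise differences decided by sign tests (objective: alternative).
-- ===== PORT A =====
def most_common_qualifier (qualifiers : List String) : Option String :=
  -- counts = []; for qual in ["<", ">", "="]: counts.append((qual, qualifiers.count(qual)))
  let counts : List (String × Int) :=
    (["<", ">", "="]).foldl (fun acc qual => acc ++ [(qual, (PySem.List.count qualifiers qual : Int))]) []
  -- counts.sort(key=lambda tup: tup[1], reverse=True)  (stable)
  let counts := PySem.List.sorted counts (fun tup => tup.2) true
  match counts with
  | c0 :: c1 :: c2 :: _ =>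
    if c0.2 > c1.2 then some c0.1
    else if c0.1 = "=" ∨ c1.1 = "=" ∨ c2.2 = c0.2 then some "="
    else none
  | _ => none   -- unreachable: counts always has exactly 3 elements

-- ===== PORT B =====
def most_common_qualifier_alt (qualifiers : List String) : Option String :=
  -- single pass: lg = #'<' - #'>', le = #'<' - #'='
  let d := qualifiers.foldl
    (fun (d : Int × Int) q =>
      if q = "<" then (d.1 + 1, d.2 + 1)
      else if q = ">" then (d.1 - 1, d.2)
      else if q = "=" then (d.1, d.2 - 1)
      else d)
    (0, 0)
  if d.2 ≤ 0 ∧ d.2 ≤ d.1 then some "="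
  else if d.1 > 0 then some "<"
  else if d.1 < 0 then some ">"
  else none

-- ===== PRECONDITION & SPEC =====
def Spec_most_common_qualifier (qualifiers : List String) (out : Option String) : Prop := out = most_common_qualifier_alt qualifiers
instance (qualifiers : List String) (out : Option String) : Decidable (Spec_most_common_qualifier qualifiers out) := by unfold Spec_most_common_qualifier; infer_instance

-- ===== CLAIM (what is proved, stated in full; the proofs are below) =====
def Claim_equal_most_common_qualifier : Prop := ∀ (qualifiers : List String), Dom_most_common_qualifier qualifiers → Spec_most_common_qualifier qualifiers (most_common_qualifier qualifiers)

-- ===== LEMMAS AND PROOFS =====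
theorem pv_ins_nil {α : Type} (p : α → α → Bool) (x : α) :
    PySem.List.insertBy p x [] = [x] := rfl

theorem pv_ins_cons {α : Type} (p : α → α → Bool) (x y : α) (ys : List α) :
    PySem.List.insertBy p x (y :: ys) =
      if p x y then x :: y :: ys else y :: PySem.List.insertBy p x ys := rfl

-- B's fold computes the two pairwise count differences.
theorem pv_fold_diffs (qs : List String) : ∀ (d : Int × Int),
    qs.foldl
      (fun (d : Int × Int) q =>
        if q = "<" then (d.1 + 1, d.2 + 1)
        else if q = ">" then (d.1 - 1, d.2)
        else if q = "=" then (d.1, d.2 - 1)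
        else d) d =
    (d.1 + (PySem.List.count qs "<" : Int) - (PySem.List.count qs ">" : Int),
     d.2 + (PySem.List.count qs "<" : Int) - (PySem.List.count qs "=" : Int)) := by
  induction qs with
  | nil => intro d; simp [PySem.List.count]
  | cons q qs ih =>
    intro d
    simp only [List.foldl_cons, ih]
    by_cases h1 : q = "<" <;> by_cases h2 : q = ">" <;> by_cases h3 : q = "=" <;>
      simp_all [PySem.List.count_eq] <;> omega

-- Both ports depend on the input only through the three counts of "<", ">", "=";
-- this lemma does the whole case analysis with those counts generalized.
set_option maxHeartbeats 2000000 in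
theorem pv_core (l g e : Int) :
    (match PySem.List.sorted ([("<", l), (">", g), ("=", e)] : List (String × Int)) (fun tup => tup.2) true with
      | c0 :: c1 :: c2 :: _ =>
        if c0.2 > c1.2 then some c0.1
        else if c0.1 = "=" ∨ c1.1 = "=" ∨ c2.2 = c0.2 then some "="
        else none
      | _ => none) =
    (if l - e ≤ 0 ∧ l - e ≤ l - g then some "="
     else if l - g > 0 then some "<"
     else if l - g < 0 then some ">"
     else (none : Option String)) := by
  rw [PySem.List.sorted_rev_eq_foldl_insertBy]
  simp only [List.foldl, pv_ins_nil, pv_ins_cons, decide_eq_true_eq]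
  split_ifs <;> simp_all [pv_ins_nil, pv_ins_cons] <;> (try omega)
  all_goals (split_ifs <;> by_cases h1 : l ≤ e <;> simp_all <;> (try omega))
  all_goals (split_ifs <;> (try simp_all) <;> omega)

-- ===== VERDICT (by name: the statement is the Claim_ definition above) =====
theorem most_common_qualifier_spec : Claim_equal_most_common_qualifier := by
  intro qs _
  unfold Spec_most_common_qualifier most_common_qualifier most_common_qualifier_alt
  simp only [List.foldl, List.nil_append, List.cons_append, pv_fold_diffs]
  simpa using pv_core (PySem.List.count qs "<") (PySem.List.count qs ">") (PySem.List.count qs "=")
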